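-- pv_equiv track=rewrite | github.com/xfrnk2/1d1python | src/boj/p16k/p16900/p16951.py | block_game
-- ===== SOURCE A (Python) =====
-- from typing import List
--
-- def block_game(n: int, k: int, array: List[int]) -> int:
--     answer = n
--     for i in range(n):
--         temp = 0
--         for j in range(n):
--             current = k * (j - i) + array[i]
--
--             if current < 1:
--                 temp = n
--                 break
--             if array[j] != current:
--                 temp += 1
--         answer = min(answer, temp)
--
--     return answer
-- ===== SOURCE B (Python) =====
-- def block_game(n, k, array):
--     if n <= 0:
--         return n
--     freq = {}
--     for i in range(n):
--         o = array[i] - k * i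
--         freq[o] = freq.get(o, 0) + 1
--     best = n
--     for o, f in freq.items():
--         if o >= 1 and o + k * (n - 1) >= 1:
--             best = min(best, n - f)
--     return best
-- ===== Notes on version B (the rewrite author's own statement) =====
-- stated objective: faster
-- what changed: Replaces A's quadratic anchor-by-anchor rescan with one pass that groups indices by the offset array[i]-k*i in a dict of counts; mismatches for an anchor are n minus its offset's frequency, and validity (all sequence values >= 1) is decided from the two endpoint values instead of scanning.
import Mathlib
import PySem

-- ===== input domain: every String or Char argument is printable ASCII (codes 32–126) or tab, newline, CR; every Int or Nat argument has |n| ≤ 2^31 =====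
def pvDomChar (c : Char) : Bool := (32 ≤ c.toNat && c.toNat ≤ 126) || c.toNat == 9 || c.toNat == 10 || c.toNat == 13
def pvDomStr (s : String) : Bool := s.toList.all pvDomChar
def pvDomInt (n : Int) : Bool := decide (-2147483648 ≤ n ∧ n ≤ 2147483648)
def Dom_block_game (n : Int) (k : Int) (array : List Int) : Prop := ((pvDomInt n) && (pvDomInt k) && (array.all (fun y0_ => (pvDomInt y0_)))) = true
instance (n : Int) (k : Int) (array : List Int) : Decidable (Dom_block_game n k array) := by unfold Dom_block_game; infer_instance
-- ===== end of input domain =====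

-- B replaces A's quadratic anchor-by-anchor scan by one pass grouping indices by the
-- offset array[i] - k*i in a counter dict; mismatches = n - frequency, validity by the
-- two endpoint values of the candidate sequence. Objective: faster (O(n^2) → O(n)).

-- ===== PORT A =====
def block_game (n : Int) (k : Int) (array : List Int) : Int :=
  (PySem.List.pyRange 0 n 1).foldl (fun answer i =>
    min answer
      ((PySem.List.pyRange 0 n 1).foldl (fun (st : Int × Bool) j =>
        if st.2 then st
        else
          if k * (j - i) + PySem.List.pyGetD array i 0 < 1 then (n, true)
          else if PySem.List.pyGetD array j 0 ≠ k * (j - i) + PySem.List.pyGetD array i 0 then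
            (st.1 + 1, st.2)
          else st) ((0 : Int), false)).1) n

-- ===== PORT B =====
def block_game_alt (n : Int) (k : Int) (array : List Int) : Int :=
  if n ≤ 0 then n
  else
    ((PySem.List.pyRange 0 n 1).foldl
        (fun (d : PySem.Dict Int Int) i =>
          d.insert (PySem.List.pyGetD array i 0 - k * i)
            (d.getD (PySem.List.pyGetD array i 0 - k * i) 0 + 1))
        PySem.Dict.empty).items.foldl
      (fun best p =>
        if 1 ≤ p.1 ∧ 1 ≤ p.1 + k * (n - 1) then min best (n - p.2) else best) n

-- ===== PRECONDITION & SPEC =====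
-- Pre_ excludes exactly the inputs where Python A raises IndexError: n larger than
-- len(array) (array[i] is read for every i < n).
def Pre_block_game (n : Int) (k : Int) (array : List Int) : Prop := n ≤ (array.length : Int)
instance (n : Int) (k : Int) (array : List Int) : Decidable (Pre_block_game n k array) := by unfold Pre_block_game; infer_instance
def pvWitness_block_game : Int × Int × List Int := (3, 2, [1, 3, 5])
def Spec_block_game (n : Int) (k : Int) (array : List Int) (out : Int) : Prop := out = block_game_alt n k array
instance (n : Int) (k : Int) (array : List Int) (out : Int) : Decidable (Spec_block_game n k array out) := by unfold Spec_block_game; infer_instance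

-- ===== CLAIM (what is proved, stated in full; the proofs are below) =====
def Claim_equal_block_game : Prop := ∀ (n : Int) (k : Int) (array : List Int), Dom_block_game n k array → Pre_block_game n k array → Spec_block_game n k array (block_game n k array)

-- ===== LEMMAS AND PROOFS =====

-- the mismatch count A computes for anchor offset x, as B computes it
def pvG (n : Int) (k : Int) (offs : List Int) (x : Int) : Int :=
  if 1 ≤ x ∧ 1 ≤ x + k * (n - 1) then n - (offs.count x : Int) else n

-- once the break flag is set, A's inner fold is constant
theorem foldA_true (n k ai i : Int) (array : List Int) (js : List Int) (t : Int) :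
    (js.foldl (fun (st : Int × Bool) j =>
        if st.2 then st
        else
          if k * (j - i) + ai < 1 then (n, true)
          else if PySem.List.pyGetD array j 0 ≠ k * (j - i) + ai then (st.1 + 1, st.2)
          else st) (t, true)) = (t, true) := by
  induction js with
  | nil => rfl
  | cons j js ih => simpa using ih

-- characterisation of A's inner loop: n on a break, else the running mismatch count
theorem foldA_false (n k ai i : Int) (array : List Int) :
    ∀ (js : List Int) (t : Int),
    ((js.foldl (fun (st : Int × Bool) j =>
        if st.2 then st
        else
          if k * (j - i) + ai < 1 then (n, true)
          else if PySem.List.pyGetD array j 0 ≠ k * (j - i) + ai then (st.1 + 1, st.2)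
          else st) (t, false))).1
    = if ∃ j ∈ js, k * (j - i) + ai < 1 then n
      else t + (js.countP (fun j => PySem.List.pyGetD array j 0 ≠ k * (j - i) + ai) : Int) := by
  intro js
  induction js with
  | nil => intro t; simp
  | cons j js ih =>
    intro t
    by_cases hb : k * (j - i) + ai < 1
    · simp only [List.foldl_cons, if_neg (Bool.false_ne_true), if_pos hb, foldA_true]
      simp [hb]
    · by_cases hm : PySem.List.pyGetD array j 0 ≠ k * (j - i) + ai
      · simp only [List.foldl_cons, if_neg (Bool.false_ne_true), if_neg hb, if_pos hm, ih]
        by_cases hex : ∃ x ∈ js, k * (x - i) + ai < 1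
        · simp [hex, hb]
        · simp [hex, hb, hm]
          ring
      · simp only [List.foldl_cons, if_neg (Bool.false_ne_true), if_neg hb, if_neg hm, ih]
        by_cases hex : ∃ x ∈ js, k * (x - i) + ai < 1
        · simp [hex, hb]
        · simp [hex, hb, hm]

-- a break happens somewhere in range(n) iff one of the two endpoint values is < 1
theorem break_iff (n k o : Int) (hn : 0 < n) :
    (∃ j ∈ PySem.List.pyRange 0 n 1, o + k * j < 1) ↔ ¬ (1 ≤ o ∧ 1 ≤ o + k * (n - 1)) := by
  constructor
  · rintro ⟨j, hj, hlt⟩ ⟨h1, h2⟩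
    rw [PySem.List.mem_pyRange_one] at hj
    by_cases hk : 0 ≤ k
    · nlinarith
    · have : k * (n - 1) ≤ k * j := by nlinarith [mul_le_mul_of_nonpos_left (show j ≤ n - 1 by omega) (le_of_not_ge hk)]
      omega
  · intro h
    by_cases h1 : 1 ≤ o
    · refine ⟨n - 1, ?_, ?_⟩
      · rw [PySem.List.mem_pyRange_one]; omega
      · by_contra hge
        exact h ⟨h1, by omega⟩
    · exact ⟨0, by rw [PySem.List.mem_pyRange_one]; omega, by omega⟩

-- the mismatch count over range(n) is n minus the frequency of the anchor offset
theorem count_eq (n k : Int) (array : List Int) (o : Int) (hn : 0 < n) :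
    (((PySem.List.pyRange 0 n 1).countP
        (fun j => PySem.List.pyGetD array j 0 ≠ o + k * j) : Int))
    = n - (((PySem.List.pyRange 0 n 1).map
          (fun i => PySem.List.pyGetD array i 0 - k * i)).count o : Int) := by
  have hlen : ((PySem.List.pyRange 0 n 1).length : Int) = n := by
    rw [PySem.List.length_pyRange_one]; omega
  rw [List.count_eq_countP, List.countP_map]
  have hsplit : (PySem.List.pyRange 0 n 1).countP
        (fun j => PySem.List.pyGetD array j 0 ≠ o + k * j)
      + (PySem.List.pyRange 0 n 1).countP
        (fun j => ¬ (PySem.List.pyGetD array j 0 ≠ o + k * j))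
      = (PySem.List.pyRange 0 n 1).length := by
    rw [List.length_eq_countP_add_countP
      (fun j => decide (PySem.List.pyGetD array j 0 ≠ o + k * j))]
    simp
  have hpt : (PySem.List.pyRange 0 n 1).countP
        (fun j => ¬ (PySem.List.pyGetD array j 0 ≠ o + k * j))
      = (PySem.List.pyRange 0 n 1).countP
        ((fun b => b == o) ∘ (fun i => PySem.List.pyGetD array i 0 - k * i)) := by
    apply List.countP_congr
    intro j _
    simp only [Function.comp, decide_eq_true_eq, beq_iff_eq, Decidable.not_not]
    constructor <;> intro h <;> omega
  omega

-- fold of min is bounded by its initial value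
theorem foldMin_le_init (g : Int → Int) :
    ∀ (l : List Int) (a : Int), l.foldl (fun a x => min a (g x)) a ≤ a := by
  intro l
  induction l with
  | nil => intro a; simp
  | cons y l ih =>
    intro a
    calc (y :: l).foldl (fun a x => min a (g x)) a
        = l.foldl (fun a x => min a (g x)) (min a (g y)) := rfl
      _ ≤ min a (g y) := ih _
      _ ≤ a := min_le_left _ _

-- fold of min is bounded by g of each member
theorem foldMin_le_mem (g : Int → Int) :
    ∀ (l : List Int) (a x : Int), x ∈ l → l.foldl (fun a x => min a (g x)) a ≤ g x := by
  intro l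
  induction l with
  | nil => intro a x hx; cases hx
  | cons y l ih =>
    intro a x hx
    rcases List.mem_cons.mp hx with h | h
    · subst h
      calc (x :: l).foldl (fun a x => min a (g x)) a
          = l.foldl (fun a x => min a (g x)) (min a (g x)) := rfl
        _ ≤ min a (g x) := foldMin_le_init g l _
        _ ≤ g x := min_le_right _ _
    · exact ih _ _ h
theorem foldMin_cases (g : Int → Int) :
    ∀ (l : List Int) (a : Int),
      l.foldl (fun a x => min a (g x)) a = a ∨ ∃ x ∈ l, l.foldl (fun a x => min a (g x)) a = g x := by
  intro l
  induction l with
  | nil => intro a; left; rfl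
  | cons y l ih =>
    intro a
    have : (y :: l).foldl (fun a x => min a (g x)) a
        = l.foldl (fun a x => min a (g x)) (min a (g y)) := rfl
    rw [this]
    rcases ih (min a (g y)) with h | ⟨x, hx, hxe⟩
    · rcases min_choice a (g y) with hm | hm
      · left; rw [h, hm]
      · right; exact ⟨y, List.mem_cons_self, by rw [h, hm]⟩
    · right; exact ⟨x, List.mem_cons_of_mem _ hx, hxe⟩

-- the min-fold only depends on the SET of elements folded over
theorem foldMin_set_eq (g : Int → Int) (l₁ l₂ : List Int) (a : Int)
    (h : ∀ x, x ∈ l₁ ↔ x ∈ l₂) :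
    l₁.foldl (fun a x => min a (g x)) a = l₂.foldl (fun a x => min a (g x)) a := by
  apply le_antisymm
  · rcases foldMin_cases g l₂ a with h2 | ⟨x, hx, hxe⟩
    · rw [h2]; exact foldMin_le_init g l₁ a
    · rw [hxe]; exact foldMin_le_mem g l₁ a x ((h x).mpr hx)
  · rcases foldMin_cases g l₁ a with h2 | ⟨x, hx, hxe⟩
    · rw [h2]; exact foldMin_le_init g l₂ a
    · rw [hxe]; exact foldMin_le_mem g l₂ a x ((h x).mp hx)

-- B's guarded fold equals the min-fold with pvG as long as the accumulator is ≤ n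
theorem foldB_eq (n k : Int) (offs : List Int) :
    ∀ (l : List Int) (a : Int), a ≤ n →
      (l.map (fun x => (x, (offs.count x : Int)))).foldl
          (fun best p => if 1 ≤ p.1 ∧ 1 ≤ p.1 + k * (n - 1) then min best (n - p.2) else best) a
      = l.foldl (fun a x => min a (pvG n k offs x)) a := by
  intro l
  induction l with
  | nil => intro a _; rfl
  | cons y l ih =>
    intro a ha
    simp only [List.map_cons, List.foldl_cons]
    by_cases hv : 1 ≤ y ∧ 1 ≤ y + k * (n - 1)
    · rw [if_pos hv]
      have : pvG n k offs y = n - (offs.count y : Int) := by unfold pvG; rw [if_pos hv]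
      rw [this, ih _ (le_trans (min_le_left _ _) ha)]
    · rw [if_neg hv]
      have hg : pvG n k offs y = n := by unfold pvG; rw [if_neg hv]
      have : min a (pvG n k offs y) = a := by rw [hg]; exact min_eq_left ha
      rw [this, ih _ ha]

-- A's outer fold, rewritten through pvG
theorem foldA_eq (n k : Int) (array : List Int) (hn : 0 < n) :
    block_game n k array
    = ((PySem.List.pyRange 0 n 1).map (fun i => PySem.List.pyGetD array i 0 - k * i)).foldl
        (fun a x => min a (pvG n k ((PySem.List.pyRange 0 n 1).map
          (fun i => PySem.List.pyGetD array i 0 - k * i)) x)) n := by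
  unfold block_game
  rw [List.foldl_map]
  apply PySem.List.foldl_congr_mem
  intro a i _
  rw [foldA_false]
  set ai := PySem.List.pyGetD array i 0 with hai
  have hcur : ∀ j : Int, k * (j - i) + ai = (ai - k * i) + k * j := by intro j; ring
  have hex : (∃ j ∈ PySem.List.pyRange 0 n 1, k * (j - i) + ai < 1)
      ↔ ¬ (1 ≤ ai - k * i ∧ 1 ≤ (ai - k * i) + k * (n - 1)) := by
    rw [← break_iff n k (ai - k * i) hn]
    constructor <;> rintro ⟨j, hj, hlt⟩ <;> exact ⟨j, hj, by rw [hcur j] at *; linarith⟩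
  by_cases hv : 1 ≤ ai - k * i ∧ 1 ≤ (ai - k * i) + k * (n - 1)
  · rw [if_neg (by rw [hex]; exact not_not_intro hv)]
    have hcp : (PySem.List.pyRange 0 n 1).countP
          (fun j => PySem.List.pyGetD array j 0 ≠ k * (j - i) + ai)
        = (PySem.List.pyRange 0 n 1).countP
          (fun j => PySem.List.pyGetD array j 0 ≠ (ai - k * i) + k * j) := by
      apply List.countP_congr; intro j _; rw [hcur j]
    rw [hcp]
    have := count_eq n k array (ai - k * i) hn
    unfold pvG
    rw [if_pos hv]
    omega
  · rw [if_pos (hex.mpr hv)]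
    unfold pvG
    rw [if_neg hv]

-- ===== VERDICT (by name: the statement is the Claim_ definition above) =====
theorem block_game_spec : Claim_equal_block_game := by
  intro n k array _ _
  unfold Spec_block_game
  by_cases hn : n ≤ 0
  · unfold block_game block_game_alt
    rw [if_pos hn, PySem.List.pyRange_one_eq_nil (by omega)]
    rfl
  · rw [not_le] at hn
    unfold block_game_alt
    rw [if_neg (by omega)]
    rw [foldA_eq n k array hn]
    have hc : (PySem.List.pyRange 0 n 1).foldl
        (fun (d : PySem.Dict Int Int) i =>
          d.insert (PySem.List.pyGetD array i 0 - k * i)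
            (d.getD (PySem.List.pyGetD array i 0 - k * i) 0 + 1)) PySem.Dict.empty
        = PySem.Dict.counter ((PySem.List.pyRange 0 n 1).map
            (fun i => PySem.List.pyGetD array i 0 - k * i)) := by
      rw [← List.foldl_map (f := fun i => PySem.List.pyGetD array i 0 - k * i)
        (g := fun (d : PySem.Dict Int Int) x => d.insert x (d.getD x 0 + 1))]
      exact PySem.Dict.foldl_insert_getD_add_one_eq_counter _
    rw [hc, PySem.Dict.items_counter]
    rw [foldB_eq n k ((PySem.List.pyRange 0 n 1).map
        (fun i => PySem.List.pyGetD array i 0 - k * i)) _ n le_rfl]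
    exact foldMin_set_eq _ _ _ n (fun x => (PySem.Set.mem_ofList _ x).symm)
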